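-- pv_equiv track=rewrite | github.com/satoshun-example/algorithm-ari | python/1-1-1_test.py | kujibiki2
-- ===== SOURCE A (Python) =====
-- def kujibiki2(n: int, m: int, k: list) -> bool:
--     k = _sort(k)
--     size = len(k)
--     for x1 in range(size):
--         for x2 in range(size):
--             for x3 in range(size):
--                 if (_binary_search(k, m - k[x1] - k[x2] - k[x3])):
--                     return True
--     return False
--
-- def _binary_search(k: list, x: int) -> bool:
--     s = int(len(k) / 2)
--     d = s
--     while True:
--         if k[s] == x:
--             return True
--         if s == 0 or s == len(k) - 1 or d == 0:
--             break
--         d = int(d / 2)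
--         if k[s] > x:
--             s -= d
--         else:
--             s += d
--     return False
--
-- def _sort(k: list) -> list:
--     return sorted(k)
-- ===== SOURCE B (Python) =====
-- def kujibiki2(n: int, m: int, k: list) -> bool:
--     ks = _sort(k)
--     values = set(ks)
--     pair_sums = {a + b for a in values for b in values}
--     triple_sums = {p + c for p in pair_sums for c in values}
--     return any(_binary_search(ks, m - t) for t in triple_sums)
--
-- def _binary_search(k: list, x: int) -> bool:
--     s = int(len(k) / 2)
--     d = s
--     while True:
--         if k[s] == x:
--             return True
--         if s == 0 or s == len(k) - 1 or d == 0: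
--             break
--         d = int(d / 2)
--         if k[s] > x:
--             s -= d
--         else:
--             s += d
--     return False
--
-- def _sort(k: list) -> list:
--     return sorted(k)
-- ===== Notes on version B (the rewrite author's own statement) =====
-- stated objective: faster
-- what changed: Replaces A's O(n^3) ordered-triple loop (one binary search per iteration) by hashed set precomputation of the distinct pairwise sums and then distinct triple sums, running the unchanged search helper once per distinct candidate remainder.
import Mathlib
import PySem

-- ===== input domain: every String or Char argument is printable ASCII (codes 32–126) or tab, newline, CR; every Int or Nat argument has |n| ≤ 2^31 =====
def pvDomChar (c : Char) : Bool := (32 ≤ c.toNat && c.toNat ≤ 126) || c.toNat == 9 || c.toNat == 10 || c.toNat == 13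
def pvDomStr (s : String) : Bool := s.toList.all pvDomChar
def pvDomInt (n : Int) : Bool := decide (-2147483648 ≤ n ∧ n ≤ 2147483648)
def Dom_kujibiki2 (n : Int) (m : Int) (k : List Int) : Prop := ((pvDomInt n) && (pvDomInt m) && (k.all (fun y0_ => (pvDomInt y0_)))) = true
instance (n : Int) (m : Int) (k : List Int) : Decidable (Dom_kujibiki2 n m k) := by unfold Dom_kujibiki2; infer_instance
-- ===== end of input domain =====

-- B keeps the module's search helper unchanged and replaces A's ordered-triple loop by
-- hashed sets of distinct pair sums and triple sums, searching once per distinct candidate.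

-- ===== PORT A =====
-- _binary_search, shared helper of Source A and Source B.
-- `int(d / 2)` on a nonnegative int d is Nat division d / 2 (exact for the admitted sizes).
-- `k[s]` is ported with pyGet?; the `none` (IndexError) branch returns false — it is unreachable,
-- since s provably stays inside the list; this only makes the function total.
def pvSearchGo (ks : List Int) (x : Int) (s : Int) (d : Nat) : Bool :=
  match PySem.List.pyGet? ks s with
  | none => false
  | some v =>
    if v == x then true
    else if s == 0 || s == (ks.length : Int) - 1 || d == 0 then false
    else
      let d' := d / 2
      pvSearchGo ks x (if v > x then s - (d' : Int) else s + (d' : Int)) d'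
termination_by d
decreasing_by
  rename_i hbrk
  simp only [Bool.or_eq_true, beq_iff_eq, not_or] at hbrk
  omega

def pvSearch (ks : List Int) (x : Int) : Bool :=
  let s := ks.length / 2   -- int(len(k)/2)
  pvSearchGo ks x (s : Int) s

-- the triple loop with early `return True` is List.any over range(size)
def kujibiki2 (n : Int) (m : Int) (k : List Int) : Bool :=
  let ks := PySem.List.sorted k (fun x => x)
  let size : Int := ks.length
  (PySem.List.pyRange 0 size 1).any fun x1 =>
    (PySem.List.pyRange 0 size 1).any fun x2 =>
      (PySem.List.pyRange 0 size 1).any fun x3 =>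
        pvSearch ks (m - PySem.List.pyGetD ks x1 0 - PySem.List.pyGetD ks x2 0 - PySem.List.pyGetD ks x3 0)

-- ===== PORT B =====
def kujibiki2_alt (n : Int) (m : Int) (k : List Int) : Bool :=
  let ks := PySem.List.sorted k (fun x => x)
  let values : PySem.Set Int := PySem.Set.ofList ks
  let pairSums : PySem.Set Int :=
    PySem.Set.ofList (values.flatMap (fun a => values.map (fun b => a + b)))
  let tripleSums : PySem.Set Int :=
    PySem.Set.ofList (pairSums.flatMap (fun p => values.map (fun c => p + c)))
  tripleSums.any (fun t => pvSearch ks (m - t))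

-- ===== PRECONDITION & SPEC =====
def Spec_kujibiki2 (n : Int) (m : Int) (k : List Int) (out : Bool) : Prop := out = kujibiki2_alt n m k
instance (n : Int) (m : Int) (k : List Int) (out : Bool) : Decidable (Spec_kujibiki2 n m k out) := by unfold Spec_kujibiki2; infer_instance

-- ===== CLAIM =====
def Claim_equal_kujibiki2 : Prop := ∀ (n : Int) (m : Int) (k : List Int), Dom_kujibiki2 n m k → Spec_kujibiki2 n m k (kujibiki2 n m k)

-- ===== LEMMAS AND PROOFS =====

-- A is true iff some triple of list values leaves a remainder the search accepts
theorem kujibiki2_iff (n m : Int) (k : List Int) :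
    kujibiki2 n m k = true ↔
      ∃ a ∈ PySem.List.sorted k (fun x => x), ∃ b ∈ PySem.List.sorted k (fun x => x),
        ∃ c ∈ PySem.List.sorted k (fun x => x),
          pvSearch (PySem.List.sorted k (fun x => x)) (m - a - b - c) = true := by
  unfold kujibiki2
  simp only [List.any_eq_true, PySem.List.mem_pyRange_one]
  constructor
  · rintro ⟨x1, ⟨h10, h11⟩, x2, ⟨h20, h21⟩, x3, ⟨h30, h31⟩, hs⟩
    refine ⟨PySem.List.pyGetD (PySem.List.sorted k (fun x => x)) x1 0, ?_,
            PySem.List.pyGetD (PySem.List.sorted k (fun x => x)) x2 0, ?_,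
            PySem.List.pyGetD (PySem.List.sorted k (fun x => x)) x3 0, ?_, hs⟩
    · rw [PySem.List.pyGetD_eq_getElem _ 0 h10 h11]; exact List.getElem_mem _
    · rw [PySem.List.pyGetD_eq_getElem _ 0 h20 h21]; exact List.getElem_mem _
    · rw [PySem.List.pyGetD_eq_getElem _ 0 h30 h31]; exact List.getElem_mem _
  · rintro ⟨a, ha, b, hb, c, hc, hs⟩
    obtain ⟨i1, hi1, e1⟩ := List.mem_iff_getElem.mp ha
    obtain ⟨i2, hi2, e2⟩ := List.mem_iff_getElem.mp hb
    obtain ⟨i3, hi3, e3⟩ := List.mem_iff_getElem.mp hc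
    refine ⟨(i1 : Int), ⟨Int.natCast_nonneg i1, by exact_mod_cast hi1⟩,
            (i2 : Int), ⟨Int.natCast_nonneg i2, by exact_mod_cast hi2⟩,
            (i3 : Int), ⟨Int.natCast_nonneg i3, by exact_mod_cast hi3⟩, ?_⟩
    rw [PySem.List.pyGetD_eq_getElem _ 0 (Int.natCast_nonneg i1) (by exact_mod_cast hi1),
        PySem.List.pyGetD_eq_getElem _ 0 (Int.natCast_nonneg i2) (by exact_mod_cast hi2),
        PySem.List.pyGetD_eq_getElem _ 0 (Int.natCast_nonneg i3) (by exact_mod_cast hi3)]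
    simpa [e1, e2, e3] using hs

-- B is true iff the same condition holds
theorem kujibiki2_alt_iff (n m : Int) (k : List Int) :
    kujibiki2_alt n m k = true ↔
      ∃ a ∈ PySem.List.sorted k (fun x => x), ∃ b ∈ PySem.List.sorted k (fun x => x),
        ∃ c ∈ PySem.List.sorted k (fun x => x),
          pvSearch (PySem.List.sorted k (fun x => x)) (m - a - b - c) = true := by
  unfold kujibiki2_alt
  simp only [List.any_eq_true, PySem.Set.mem_ofList, List.mem_flatMap, List.mem_map]
  constructor
  · rintro ⟨t, ⟨p, hp, c, hc, rfl⟩, hs⟩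
    obtain ⟨a, ha, b, hb, rfl⟩ := hp
    exact ⟨a, ha, b, hb, c, hc, by have : m - (a + b + c) = m - a - b - c := by ring
                                   rwa [this] at hs⟩
  · rintro ⟨a, ha, b, hb, c, hc, hs⟩
    refine ⟨a + b + c, ⟨a + b, ?_, c, hc, rfl⟩, ?_⟩
    · exact ⟨a, ha, b, hb, rfl⟩
    · have : m - (a + b + c) = m - a - b - c := by ring
      rwa [this]

-- ===== VERDICT =====
theorem kujibiki2_spec : Claim_equal_kujibiki2 := by
  intro n m k _
  unfold Spec_kujibiki2
  exact Bool.eq_iff_iff.mpr (by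
    simpa using (kujibiki2_iff n m k).trans (kujibiki2_alt_iff n m k).symm)
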